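-- pv_equiv track=rewrite | github.com/981377660LMT/algorithm-study | 4_set/有序集合/1989_抓人游戏-寻找范围内的最左元素.py | catchMaximumAmountofPeople
-- ===== SOURCE A (Python) =====
-- from typing import List
--
-- def catchMaximumAmountofPeople(team: List[int], dist: int) -> int:
--     """双指针查找1最左边的未被抓的且在范围内的0."""
--     zeros = [i for i, v in enumerate(team) if v == 0]
--     ones = [i for i, v in enumerate(team) if v == 1]
--     i, j = 0, 0
--     res = 0
--     while i < len(zeros) and j < len(ones):
--         v0, v1 = zeros[i], ones[j]
--         if abs(v1 - v0) <= dist: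
--             res += 1
--             i += 1
--             j += 1
--         elif v0 < v1:
--             i += 1
--         else:
--             j += 1
--     return res
-- ===== SOURCE B (Python) =====
-- from typing import List
-- from collections import deque
--
--
-- def catchMaximumAmountofPeople(team: List[int], dist: int) -> int:
--     """Single left-to-right sweep keeping deques of unmatched zero/one indices."""
--     zeros, ones = deque(), deque()
--     res = 0
--     for t, v in enumerate(team):
--         if v == 0:
--             while ones and ones[0] < t - dist:
--                 ones.popleft()
--             if ones:
--                 ones.popleft()
--                 res += 1
--             else:
--                 zeros.append(t)
--         elif v == 1:
--             while zeros and zeros[0] < t - dist: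
--                 zeros.popleft()
--             if zeros:
--                 zeros.popleft()
--                 res += 1
--             else:
--                 ones.append(t)
--     return res
-- ===== Notes on version B (the rewrite author's own statement) =====
-- stated objective: alternative
-- what changed: Replaced A's precomputation of the full zeros/ones index lists merged by a two-pointer loop with a single left-to-right sweep keeping two deques of unmatched zero/one indices, lazily evicting out-of-range candidates and matching the current element against the front of the opposite deque.
import Mathlib
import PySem

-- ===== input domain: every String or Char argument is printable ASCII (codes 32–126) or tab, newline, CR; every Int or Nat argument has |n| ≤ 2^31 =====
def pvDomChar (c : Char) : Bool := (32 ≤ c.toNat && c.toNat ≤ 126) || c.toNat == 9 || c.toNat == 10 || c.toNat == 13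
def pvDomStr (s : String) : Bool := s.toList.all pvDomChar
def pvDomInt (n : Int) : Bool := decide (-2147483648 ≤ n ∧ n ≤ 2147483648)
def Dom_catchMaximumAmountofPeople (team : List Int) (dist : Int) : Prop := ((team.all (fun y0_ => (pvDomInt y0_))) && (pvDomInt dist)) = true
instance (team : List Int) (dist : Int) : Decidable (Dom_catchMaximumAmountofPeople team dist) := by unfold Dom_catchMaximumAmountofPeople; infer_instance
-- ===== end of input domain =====

-- B is an alternative single-pass algorithm (sliding-window deques of unmatched indices)
-- replacing A's precomputed zeros/ones index lists merged with two pointers; same O(n) cost.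

-- ===== PORT A =====
-- the while loop of A: i, j are the two pointers into zeros/ones
def pvLoopA (zeros ones : List Int) (dist : Int) (i j : Nat) (res : Int) : Int :=
  if h : i < zeros.length ∧ j < ones.length then
    let v0 := zeros.getD i 0
    let v1 := ones.getD j 0
    if |v1 - v0| ≤ dist then pvLoopA zeros ones dist (i + 1) (j + 1) (res + 1)
    else if v0 < v1 then pvLoopA zeros ones dist (i + 1) j res
    else pvLoopA zeros ones dist i (j + 1) res
  else res
termination_by (zeros.length - i) + (ones.length - j)
decreasing_by all_goals omega

def catchMaximumAmountofPeople (team : List Int) (dist : Int) : Int :=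
  let zeros := (PySem.List.enumerate team).filterMap
    (fun p => if p.2 = 0 then some p.1 else none)
  let ones := (PySem.List.enumerate team).filterMap
    (fun p => if p.2 = 1 then some p.1 else none)
  pvLoopA zeros ones dist 0 0 0

-- ===== PORT B =====
-- the inner `while q and q[0] < lim: q.popleft()` loop
def pvEvict (lim : Int) : List Int → List Int
  | [] => []
  | x :: xs => if x < lim then pvEvict lim xs else x :: xs

-- one iteration of B's for-loop; state = (zeros deque, ones deque, res)
def pvStepB (dist : Int) (s : List Int × List Int × Int) (p : Int × Int) :
    List Int × List Int × Int :=
  if p.2 = 0 then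
    match pvEvict (p.1 - dist) s.2.1 with
    | _ :: rest => (s.1, rest, s.2.2 + 1)
    | [] => (s.1 ++ [p.1], [], s.2.2)
  else if p.2 = 1 then
    match pvEvict (p.1 - dist) s.1 with
    | _ :: rest => (rest, s.2.1, s.2.2 + 1)
    | [] => ([], s.2.1 ++ [p.1], s.2.2)
  else s

def catchMaximumAmountofPeople_alt (team : List Int) (dist : Int) : Int :=
  ((PySem.List.enumerate team).foldl (pvStepB dist) ([], [], 0)).2.2

-- ===== PRECONDITION & SPEC =====
def Spec_catchMaximumAmountofPeople (team : List Int) (dist : Int) (out : Int) : Prop := out = catchMaximumAmountofPeople_alt team dist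
instance (team : List Int) (dist : Int) (out : Int) : Decidable (Spec_catchMaximumAmountofPeople team dist out) := by unfold Spec_catchMaximumAmountofPeople; infer_instance

-- ===== CLAIM (what is proved, stated in full; the proofs are below) =====
def Claim_equal_catchMaximumAmountofPeople : Prop := ∀ (team : List Int) (dist : Int), Dom_catchMaximumAmountofPeople team dist → Spec_catchMaximumAmountofPeople team dist (catchMaximumAmountofPeople team dist)

-- ===== LEMMAS AND PROOFS =====

-- reduction lemmas for one iteration of B's loop
lemma pvStepB_zero_nil (dist t res : Int) (zq oq : List Int)
    (h : pvEvict (t - dist) oq = []) :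
    pvStepB dist (zq, oq, res) (t, 0) = (zq ++ [t], [], res) := by
  simp [pvStepB, h]

lemma pvStepB_zero_cons (dist t res : Int) (zq oq : List Int) (o : Int) (rest : List Int)
    (h : pvEvict (t - dist) oq = o :: rest) :
    pvStepB dist (zq, oq, res) (t, 0) = (zq, rest, res + 1) := by
  simp [pvStepB, h]

lemma pvStepB_one_nil (dist t res : Int) (zq oq : List Int)
    (h : pvEvict (t - dist) zq = []) :
    pvStepB dist (zq, oq, res) (t, 1) = ([], oq ++ [t], res) := by
  simp [pvStepB, h]

lemma pvStepB_one_cons (dist t res : Int) (zq oq : List Int) (z : Int) (rest : List Int)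
    (h : pvEvict (t - dist) zq = z :: rest) :
    pvStepB dist (zq, oq, res) (t, 1) = (rest, oq, res + 1) := by
  simp [pvStepB, h]

lemma pvStepB_other (dist : Int) (s : List Int × List Int × Int) (t v : Int)
    (h0 : ¬ v = 0) (h1 : ¬ v = 1) :
    pvStepB dist s (t, v) = s := by
  simp [pvStepB, h0, h1]

-- the common mathematical core: the two-pointer merge as a recursion on the two lists
def pairF (dist : Int) : List Int → List Int → Int
  | z :: zs, o :: os =>
      if |o - z| ≤ dist then 1 + pairF dist zs os
      else if z < o then pairF dist zs (o :: os)
      else pairF dist (z :: zs) os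
  | _, _ => 0
termination_by zs os => zs.length + os.length

lemma pairF_nil_left (dist : Int) (os : List Int) : pairF dist [] os = 0 := by
  cases os <;> simp [pairF]

lemma pairF_nil_right (dist : Int) (zs : List Int) : pairF dist zs [] = 0 := by
  cases zs <;> simp [pairF]

-- stale zeros (out of range, to the left) are skipped by the merge
lemma pairF_skip_left (dist t : Int) (os l : List Int) :
    ∀ a : List Int, (∀ x ∈ a, x < t - dist ∧ x < t) →
    pairF dist (a ++ l) (t :: os) = pairF dist l (t :: os) := by
  intro a
  induction a with
  | nil => simp
  | cons x a ih =>
    intro h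
    have hx := h x (by simp)
    have h1 : ¬ |t - x| ≤ dist := by
      rw [abs_of_pos (by omega)]; omega
    simp only [List.cons_append, pairF, h1, if_false, hx.2, if_true]
    exact ih (fun y hy => h y (by simp [hy]))

-- stale ones are skipped by the merge
lemma pairF_skip_right (dist t : Int) (zs l : List Int) :
    ∀ a : List Int, (∀ x ∈ a, x < t - dist ∧ x < t) →
    pairF dist (t :: zs) (a ++ l) = pairF dist (t :: zs) l := by
  intro a
  induction a with
  | nil => simp
  | cons x a ih =>
    intro h
    have hx := h x (by simp)
    have h1 : ¬ |x - t| ≤ dist := by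
      rw [abs_of_neg (by omega)]; omega
    have h2 : ¬ t < x := by omega
    simp only [List.cons_append, pairF, h1, if_false, h2, if_false]
    exact ih (fun y hy => h y (by simp [hy]))

-- pvEvict splits a queue into the dropped stale prefix and the kept rest
lemma pvEvict_split (lim : Int) (q : List Int) :
    ∃ a, q = a ++ pvEvict lim q ∧ (∀ x ∈ a, x < lim) ∧
      (∀ y rest, pvEvict lim q = y :: rest → ¬ y < lim) := by
  induction q with
  | nil => exact ⟨[], by simp [pvEvict], by simp, by simp [pvEvict]⟩
  | cons x xs ih =>
    by_cases hx : x < lim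
    · obtain ⟨a, h1, h2, h3⟩ := ih
      refine ⟨x :: a, ?_, ?_, ?_⟩
      · simp only [pvEvict, if_pos hx, List.cons_append, List.cons.injEq, true_and]
        exact h1
      · intro y hy
        rcases List.mem_cons.mp hy with hy | hy
        · omega
        · exact h2 y hy
      · intro y rest h
        exact h3 y rest (by simpa [pvEvict, if_pos hx] using h)
    · refine ⟨[], by simp [pvEvict, hx], by simp, ?_⟩
      intro y rest h
      simp only [pvEvict, if_neg hx] at h
      injection h with h1 h2
      omega

-- elements of the evicted queue are elements of the queue
lemma pvEvict_subset (lim : Int) (q : List Int) : ∀ x ∈ pvEvict lim q, x ∈ q := by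
  induction q with
  | nil => simp [pvEvict]
  | cons y ys ih =>
    intro x hx
    by_cases hy : y < lim
    · simp [pvEvict, hy] at hx; exact List.mem_cons_of_mem _ (ih x hx)
    · simpa [pvEvict, hy] using hx

-- zero / one index projections of the remaining enumerated suffix
def pvZ (ws : List (Int × Int)) : List Int :=
  ws.filterMap (fun p => if p.2 = 0 then some p.1 else none)
def pvO (ws : List (Int × Int)) : List Int :=
  ws.filterMap (fun p => if p.2 = 1 then some p.1 else none)

-- MAIN INVARIANT of B's sweep: with one deque empty and the other holding
-- unmatched indices all to the left of the remaining positions, the sweep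
-- computes exactly the two-pointer merge pairF of the remaining indices.
lemma pvSweep (dist : Int) :
    ∀ (ws : List (Int × Int)) (q : List Int) (res : Int),
      List.Pairwise (fun p r => p.1 < r.1) ws →
      (∀ x ∈ q, ∀ w ∈ ws, x < w.1) →
      (((ws.foldl (pvStepB dist) (q, [], res)).2.2 = res + pairF dist (q ++ pvZ ws) (pvO ws))
      ∧ ((ws.foldl (pvStepB dist) ([], q, res)).2.2 = res + pairF dist (pvZ ws) (q ++ pvO ws))) := by
  intro ws
  induction ws with
  | nil =>
    intro q res _ _
    constructor <;> simp [pvZ, pvO, pairF_nil_left, pairF_nil_right]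
  | cons w ws ih =>
    intro q res hpw hq
    obtain ⟨t, v⟩ := w
    have hpw' : List.Pairwise (fun p r => p.1 < r.1) ws := hpw.tail
    have htws : ∀ w' ∈ ws, t < w'.1 := by
      intro w' hw'; exact (List.pairwise_cons.mp hpw).1 w' hw'
    have hqt : ∀ x ∈ q, x < t := fun x hx => hq x hx (t, v) (by simp)
    constructor
    · -- state (q, [], res)
      by_cases hv0 : v = 0
      · -- push t onto zeros deque
        subst hv0
        rw [List.foldl_cons, pvStepB_zero_nil dist t res q [] (by simp [pvEvict])]
        have hb : ∀ x ∈ q ++ [t], ∀ w' ∈ ws, x < w'.1 := by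
          intro x hx w' hw'
          rcases List.mem_append.mp hx with h | h
          · exact hq x h w' (by simp [hw'])
          · simp at h; subst h; exact htws w' hw'
        rw [(ih (q ++ [t]) res hpw' hb).1]
        simp [pvZ, pvO]
      · by_cases hv1 : v = 1
        · -- try to match against zeros deque
          subst hv1
          obtain ⟨a, hsplit, hstale, hkeep⟩ := pvEvict_split (t - dist) q
          have hZ : pvZ ((t, 1) :: ws) = pvZ ws := by simp [pvZ]
          have hO : pvO ((t, 1) :: ws) = t :: pvO ws := by simp [pvO]
          have hstale' : ∀ x ∈ a, x < t - dist ∧ x < t := by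
            intro x hx
            exact ⟨hstale x hx, hqt x (hsplit ▸ List.mem_append_left _ hx)⟩
          cases hev : pvEvict (t - dist) q with
          | nil =>
            -- all stale: push t onto ones deque
            rw [List.foldl_cons, pvStepB_one_nil dist t res q [] hev, List.nil_append]
            have hb : ∀ x ∈ [t], ∀ w' ∈ ws, x < w'.1 := by
              intro x hx w' hw'; simp at hx; subst hx; exact htws w' hw'
            rw [(ih [t] res hpw' hb).2, hZ, hO]
            rw [hsplit, hev, List.append_nil]
            rw [pairF_skip_left dist t (pvO ws) (pvZ ws) a hstale']
            simp
          | cons z rest =>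
            -- match: z is in range
            rw [List.foldl_cons, pvStepB_one_cons dist t res q [] z rest hev]
            have hzq : z ∈ q := pvEvict_subset _ _ z (hev ▸ List.mem_cons_self ..)
            have hz1 : ¬ z < t - dist := hkeep z rest hev
            have hz2 : z < t := hqt z hzq
            have habs : |t - z| ≤ dist := by rw [abs_of_pos (by omega)]; omega
            have hb : ∀ x ∈ rest, ∀ w' ∈ ws, x < w'.1 := by
              intro x hx w' hw'
              have : x ∈ q := pvEvict_subset _ _ x (hev ▸ List.mem_cons_of_mem _ hx)
              exact hq x this w' (by simp [hw'])
            rw [(ih rest (res + 1) hpw' hb).1, hZ, hO]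
            rw [hsplit, hev, List.append_assoc, List.cons_append]
            rw [pairF_skip_left dist t (pvO ws) (z :: (rest ++ pvZ ws)) a hstale']
            simp only [pairF, habs, if_true]
            ring
        · -- other value: no-op
          rw [List.foldl_cons, pvStepB_other dist _ t v hv0 hv1]
          have hb : ∀ x ∈ q, ∀ w' ∈ ws, x < w'.1 := by
            intro x hx w' hw'; exact hq x hx w' (by simp [hw'])
          rw [(ih q res hpw' hb).1]
          simp [pvZ, pvO, hv0, hv1]
    · -- state ([], q, res)  (mirror)
      by_cases hv0 : v = 0
      · -- try to match against ones deque
        subst hv0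
        obtain ⟨a, hsplit, hstale, hkeep⟩ := pvEvict_split (t - dist) q
        have hZ : pvZ ((t, 0) :: ws) = t :: pvZ ws := by simp [pvZ]
        have hO : pvO ((t, 0) :: ws) = pvO ws := by simp [pvO]
        have hstale' : ∀ x ∈ a, x < t - dist ∧ x < t := by
          intro x hx
          exact ⟨hstale x hx, hqt x (hsplit ▸ List.mem_append_left _ hx)⟩
        cases hev : pvEvict (t - dist) q with
        | nil =>
          rw [List.foldl_cons, pvStepB_zero_nil dist t res [] q hev, List.nil_append]
          have hb : ∀ x ∈ [t], ∀ w' ∈ ws, x < w'.1 := by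
            intro x hx w' hw'; simp at hx; subst hx; exact htws w' hw'
          rw [(ih [t] res hpw' hb).1, hZ, hO]
          rw [hsplit, hev, List.append_nil]
          rw [pairF_skip_right dist t (pvZ ws) (pvO ws) a hstale']
          simp
        | cons o rest =>
          rw [List.foldl_cons, pvStepB_zero_cons dist t res [] q o rest hev]
          have hoq : o ∈ q := pvEvict_subset _ _ o (hev ▸ List.mem_cons_self ..)
          have ho1 : ¬ o < t - dist := hkeep o rest hev
          have ho2 : o < t := hqt o hoq
          have habs : |o - t| ≤ dist := by rw [abs_of_neg (by omega)]; omega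
          have hb : ∀ x ∈ rest, ∀ w' ∈ ws, x < w'.1 := by
            intro x hx w' hw'
            have : x ∈ q := pvEvict_subset _ _ x (hev ▸ List.mem_cons_of_mem _ hx)
            exact hq x this w' (by simp [hw'])
          rw [(ih rest (res + 1) hpw' hb).2, hZ, hO]
          rw [hsplit, hev, List.append_assoc, List.cons_append]
          rw [pairF_skip_right dist t (pvZ ws) (o :: (rest ++ pvO ws)) a hstale']
          simp only [pairF, habs, if_true]
          ring
      · by_cases hv1 : v = 1
        · -- push t onto ones deque
          subst hv1
          rw [List.foldl_cons, pvStepB_one_nil dist t res [] q (by simp [pvEvict])]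
          have hb : ∀ x ∈ q ++ [t], ∀ w' ∈ ws, x < w'.1 := by
            intro x hx w' hw'
            rcases List.mem_append.mp hx with h | h
            · exact hq x h w' (by simp [hw'])
            · simp at h; subst h; exact htws w' hw'
          rw [(ih (q ++ [t]) res hpw' hb).2]
          simp [pvZ, pvO]
        · rw [List.foldl_cons, pvStepB_other dist _ t v hv0 hv1]
          have hb : ∀ x ∈ q, ∀ w' ∈ ws, x < w'.1 := by
            intro x hx w' hw'; exact hq x hx w' (by simp [hw'])
          rw [(ih q res hpw' hb).2]
          simp [pvZ, pvO, hv0, hv1]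

-- A's while loop computes pairF of the unconsumed suffixes
lemma pvLoopA_eq (zeros ones : List Int) (dist : Int) :
    ∀ (i j : Nat) (res : Int),
      pvLoopA zeros ones dist i j res = res + pairF dist (zeros.drop i) (ones.drop j) := by
  intro i j res
  induction i, j, res using pvLoopA.induct zeros ones dist with
  | case1 i j res h v0 v1 hle ih =>
    have hz := List.drop_eq_getElem_cons h.1
    have ho := List.drop_eq_getElem_cons h.2
    rw [pvLoopA, dif_pos h, if_pos (by simpa [v0, v1, List.getD_eq_getElem, h.1, h.2] using hle)]
    rw [ih, hz, ho]
    simp only [pairF]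
    rw [if_pos (by simpa [v0, v1, List.getD_eq_getElem, h.1, h.2] using hle)]
    ring
  | case2 i j res h v0 v1 hle hlt ih =>
    have hz := List.drop_eq_getElem_cons h.1
    have ho := List.drop_eq_getElem_cons h.2
    have hle' : ¬ |ones[j] - zeros[i]| ≤ dist := by
      simpa [v0, v1, List.getD_eq_getElem, h.1, h.2] using hle
    have hlt' : zeros[i] < ones[j] := by
      simpa [v0, v1, List.getD_eq_getElem, h.1, h.2] using hlt
    rw [pvLoopA, dif_pos h, if_neg (by simpa [v0, v1, List.getD_eq_getElem, h.1, h.2] using hle),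
      if_pos (by simpa [v0, v1, List.getD_eq_getElem, h.1, h.2] using hlt)]
    rw [ih, hz, ho]
    simp only [pairF, hle', if_false, hlt', if_true]
  | case3 i j res h v0 v1 hle hlt ih =>
    have hz := List.drop_eq_getElem_cons h.1
    have ho := List.drop_eq_getElem_cons h.2
    have hle' : ¬ |ones[j] - zeros[i]| ≤ dist := by
      simpa [v0, v1, List.getD_eq_getElem, h.1, h.2] using hle
    have hlt' : ¬ zeros[i] < ones[j] := by
      simpa [v0, v1, List.getD_eq_getElem, h.1, h.2] using hlt
    rw [pvLoopA, dif_pos h, if_neg (by simpa [v0, v1, List.getD_eq_getElem, h.1, h.2] using hle),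
      if_neg (by simpa [v0, v1, List.getD_eq_getElem, h.1, h.2] using hlt)]
    rw [ih, hz, ho]
    simp only [pairF, hle', if_false, hlt', if_false]
  | case4 i j res h =>
    rw [pvLoopA, dif_neg h]
    rcases not_and_or.mp h with h | h
    · rw [List.drop_eq_nil_of_le (by omega), pairF_nil_left]; ring
    · rw [List.drop_eq_nil_of_le (i := j) (by omega), pairF_nil_right]; ring

-- ===== VERDICT (by name: the statement is the Claim_ definition above) =====
theorem catchMaximumAmountofPeople_spec : Claim_equal_catchMaximumAmountofPeople := by
  intro team dist _
  show catchMaximumAmountofPeople team dist = catchMaximumAmountofPeople_alt team dist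
  unfold catchMaximumAmountofPeople catchMaximumAmountofPeople_alt
  rw [pvLoopA_eq]
  have h := (pvSweep dist (PySem.List.enumerate team) [] 0
    (PySem.List.pairwise_lt_enumerate team 0) (by simp)).1
  rw [h]
  simp [pvZ, pvO]
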